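-- pv_equiv track=rewrite | github.com/na0th/algorithm | 프로그래머스/0/120956. 옹알이 （1）/옹알이 （1）.py | solution
-- ===== SOURCE A (Python) =====
-- import itertools
--
-- def solution(babbling):
--
--     dic = dict()
--
--     can_say =["aya","ye","woo","ma"]
--     all_babbling = []
--
--     for i in range(1,5):
--         npr = itertools.permutations(can_say,i)
--
--         for item in npr :
--             temp = "".join(item)
--             dic[temp]=1
--
--     cnt = 0
--
--     for item in babbling :
--         if item in dic :
--             cnt+=1
--
--
--     return cnt
-- ===== SOURCE B (Python) =====
-- def solution(babbling):
--     words = ("aya", "ye", "woo", "ma")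
--
--     def ok(s):
--         if not s:
--             return False
--         remaining = set(words)
--         while s:
--             for w in words:
--                 if s.startswith(w):
--                     if w not in remaining:
--                         return False
--                     remaining.discard(w)
--                     s = s[len(w):]
--                     break
--             else:
--                 return False
--         return True
--
--     return sum(1 for s in babbling if ok(s))
-- ===== Notes on version B (the rewrite author's own statement) =====
-- stated objective: simpler
-- what changed: A precomputes all permutation-concatenations of the four words into a dict and looks each babbling up; B instead parses each babbling left-to-right, greedily consuming a matching word and forbidding reuse (safe because the words start with distinct letters), so no permutation table is built.
import Mathlib
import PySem

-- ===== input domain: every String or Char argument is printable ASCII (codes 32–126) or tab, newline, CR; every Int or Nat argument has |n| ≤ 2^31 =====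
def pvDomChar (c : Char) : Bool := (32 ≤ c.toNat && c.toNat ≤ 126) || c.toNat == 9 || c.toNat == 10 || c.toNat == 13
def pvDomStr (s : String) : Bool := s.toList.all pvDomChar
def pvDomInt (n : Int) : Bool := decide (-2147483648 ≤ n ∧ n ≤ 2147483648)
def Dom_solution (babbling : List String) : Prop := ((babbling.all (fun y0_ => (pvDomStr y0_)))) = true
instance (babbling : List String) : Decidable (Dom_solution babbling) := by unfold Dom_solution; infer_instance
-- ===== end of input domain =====

-- B replaces A's precompute-all-permutation-concatenations-into-a-dict lookup by a direct greedy
-- left-to-right parse of each string (consume a matching word, forbid reuse); objective: simpler.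

-- ===== PORT A =====
-- the dict A builds before its counting loop (hoisted to a helper; same value every call)
def pvDicA : PySem.Dict String Int :=
  (PySem.List.pyRange 1 5 1).foldl
    (fun d i =>
      (PySem.List.permutations ["aya", "ye", "woo", "ma"] i.toNat).foldl
        (fun d item => d.insert (PySem.Str.join "" item) 1) d)
    PySem.Dict.empty

def solution (babbling : List String) : Int :=
  babbling.foldl (fun cnt item => if pvDicA.contains item then cnt + 1 else cnt) 0

-- ===== PORT B =====
def pvWords : List String := ["aya", "ye", "woo", "ma"]

-- the `while s:` loop of B's `ok`: greedily strip one unused word per round.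
-- `fuel` only makes the loop total: each successful round removes one word from `rem`,
-- so `rem.length` rounds always suffice; at fuel 0 only the `while` guard remains.
def pvConsumeGo (fuel : Nat) (cs : List Char) (rem : List String) : Bool :=
  match fuel with
  | 0 => cs.isEmpty
  | fuel + 1 =>
    if cs.isEmpty then true
    else
      match pvWords.find? (fun w => PySem.Chars.startswith cs w.toList) with
      | none => false
      | some w =>
          if w ∈ rem then pvConsumeGo fuel (cs.drop w.toList.length) (rem.erase w)
          else false

def pvOk (s : String) : Bool := !s.toList.isEmpty && pvConsumeGo pvWords.length s.toList pvWords

def solution_alt (babbling : List String) : Int :=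
  babbling.foldl (fun cnt s => if pvOk s then cnt + 1 else cnt) 0

-- ===== PRECONDITION & SPEC =====
def Spec_solution (babbling : List String) (out : Int) : Prop := out = solution_alt babbling
instance (babbling : List String) (out : Int) : Decidable (Spec_solution babbling out) := by unfold Spec_solution; infer_instance

-- ===== CLAIM (what is proved, stated in full; the proofs are below) =====
def Claim_equal_solution : Prop := ∀ (babbling : List String), Dom_solution babbling → Spec_solution babbling (solution babbling)

-- ===== LEMMAS AND PROOFS =====

-- the key list of A's dict (proof-side abbreviation)
def pvKeys : List String := pvDicA.keys

-- all duplicate-free lists drawn from a pool, any order, length ≤ fuel (proof-side enumeration)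
def pvNodupOver : Nat → List String → List (List String)
  | 0, _ => [[]]
  | n + 1, pool => [] :: pool.flatMap (fun x => (pvNodupOver n (pool.erase x)).map (x :: ·))

lemma mem_pvNodupOver (l : List String) : ∀ pool, l.Nodup → (∀ w ∈ l, w ∈ pool) →
    l ∈ pvNodupOver pool.length pool := by
  induction l with
  | nil =>
    intro pool _ _
    cases h : pool.length <;> simp [pvNodupOver]
  | cons w t ih =>
    intro pool hnd hsub
    have hwpool : w ∈ pool := hsub w List.mem_cons_self
    obtain ⟨n, hn⟩ : ∃ n, pool.length = n + 1 :=
      ⟨pool.length - 1, by have := List.length_pos_of_mem hwpool; omega⟩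
    rw [hn, pvNodupOver]
    refine List.mem_cons_of_mem _ ?_
    rw [List.mem_flatMap]
    refine ⟨w, hwpool, ?_⟩
    rw [List.mem_map]
    refine ⟨t, ?_, rfl⟩
    have hsub' : ∀ y ∈ t, y ∈ pool.erase w := by
      intro y hy
      have hyw : y ≠ w := fun h => (List.nodup_cons.mp hnd).1 (h ▸ hy)
      exact (List.mem_erase_of_ne hyw).mpr (hsub y (List.mem_cons_of_mem _ hy))
    have := ih (pool.erase w) (List.Nodup.of_cons hnd) hsub'
    rwa [List.length_erase_of_mem hwpool, hn, Nat.add_sub_cancel] at this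

lemma pvJoin_flatten (ls : List (List Char)) : PySem.Chars.join [] ls = ls.flatten := by
  induction ls with
  | nil => rfl
  | cons a t ih =>
    cases t <;> simp_all [PySem.Chars.join, List.intercalate, List.intersperse]

-- every nonempty duplicate-free concatenation of words is a key of A's dict (finite check)
set_option maxRecDepth 100000 in
lemma pvJoin_mem_keys : ∀ l ∈ pvNodupOver 4 pvWords, l = [] ∨ PySem.Str.join "" l ∈ pvKeys := by
  decide

-- every key of A's dict passes B's check (finite check)
set_option maxRecDepth 100000 in
lemma pvKeys_ok : ∀ s ∈ pvKeys, pvOk s = true := by decide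

-- soundness of the greedy parse: a consumed string is a concatenation of distinct words from rem
lemma pvConsumeGo_sound : ∀ (fuel : Nat) (cs : List Char) (rem : List String), rem.Nodup →
    pvConsumeGo fuel cs rem = true →
    ∃ l : List String, l.Nodup ∧ (∀ w ∈ l, w ∈ rem) ∧ cs = (l.map String.toList).flatten := by
  intro fuel
  induction fuel with
  | zero =>
    intro cs rem _ h
    exact ⟨[], by simp, by simp, by simpa [pvConsumeGo] using h⟩
  | succ n ih =>
    intro cs rem hnd h
    rw [pvConsumeGo] at h
    by_cases hemp : cs.isEmpty
    · exact ⟨[], by simp, by simp, by simpa using hemp⟩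
    · rw [if_neg hemp] at h
      cases hfind : pvWords.find? (fun w => PySem.Chars.startswith cs w.toList) with
      | none => rw [hfind] at h; dsimp only at h; exact absurd h (by simp)
      | some w =>
        rw [hfind] at h
        dsimp only at h
        by_cases hw : w ∈ rem
        · rw [if_pos hw] at h
          obtain ⟨l', hnd', hsub', hcs'⟩ := ih _ _ (List.Nodup.erase _ hnd) h
          have hstart : PySem.Chars.startswith cs w.toList = true := by
            simpa using List.find?_some hfind
          have hpre : w.toList <+: cs := (PySem.Chars.startswith_iff cs w.toList).mp hstart
          obtain ⟨t, ht⟩ := hpre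
          refine ⟨w :: l', ?_, ?_, ?_⟩
          · refine List.nodup_cons.mpr ⟨fun hmem => ?_, hnd'⟩
            exact ((List.Nodup.mem_erase_iff hnd).mp (hsub' w hmem)).1 rfl
          · intro y hy
            rcases List.mem_cons.mp hy with h1 | h2
            · exact h1 ▸ hw
            · exact List.erase_subset (hsub' y h2)
          · have hdrop : cs.drop w.toList.length = t := by subst ht; simp
            rw [List.map_cons, List.flatten_cons, ← hcs', hdrop, ht]
        · rw [if_neg hw] at h; exact absurd h (by simp)

-- the per-string equivalence: A's dict membership test equals B's greedy check
set_option maxRecDepth 100000 in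
lemma pvContains_eq_ok (s : String) : pvDicA.contains s = pvOk s := by
  by_cases hb : pvOk s = true
  · rw [hb]
    have hne : ¬ s.toList.isEmpty := by
      intro h; simp [pvOk, h] at hb
    have hcons : pvConsumeGo pvWords.length s.toList pvWords = true := by
      simp only [pvOk, Bool.and_eq_true] at hb; exact hb.2
    obtain ⟨l, hnd, hsub, hcs⟩ := pvConsumeGo_sound _ _ _ (by decide) hcons
    have hmem : l ∈ pvNodupOver 4 pvWords := by
      have := mem_pvNodupOver l pvWords hnd hsub
      simpa using this
    rcases pvJoin_mem_keys l hmem with hnil | hkey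
    · subst hnil; simp [hcs] at hne
    · have hsj : s = PySem.Str.join "" l := by
        apply String.toList_inj.mp
        rw [hcs]
        have : (PySem.Str.join "" l).toList = PySem.Chars.join "".toList (l.map String.toList) := by
          simp [PySem.Str.join]
        rw [this]
        exact (pvJoin_flatten (l.map String.toList)).symm
      rw [PySem.Dict.contains_eq_decide_mem_keys, decide_eq_true_iff]
      exact hsj ▸ hkey
  · rw [Bool.not_eq_true] at hb
    rw [hb]
    by_contra hc
    rw [Bool.not_eq_false, PySem.Dict.contains_eq_decide_mem_keys, decide_eq_true_iff] at hc
    have := pvKeys_ok s hc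
    rw [hb] at this
    exact Bool.false_ne_true this

lemma pvFoldl_eq (bs : List String) (c : Int) :
    bs.foldl (fun cnt item => if pvDicA.contains item then cnt + 1 else cnt) c
      = bs.foldl (fun cnt s => if pvOk s then cnt + 1 else cnt) c := by
  induction bs generalizing c with
  | nil => rw [List.foldl_nil, List.foldl_nil]
  | cons x t ih => rw [List.foldl_cons, List.foldl_cons, pvContains_eq_ok]; exact ih _

-- ===== VERDICT (by name: the statement is the Claim_ definition above) =====
theorem solution_spec : Claim_equal_solution := by
  intro babbling _
  unfold Spec_solution solution solution_alt
  exact pvFoldl_eq babbling 0
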